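-- pv_equiv track=rewrite | github.com/Gygrus/WDI-ASD-course-Python | Semestr II/Egzaminy/2019-2020/Zad2, termin 3.py | tower
-- ===== SOURCE A (Python) =====
-- def tower(A):
--     n = len(A)
--     #pierwsza krotka to współrzędne klocka wiszącego na brzegu, druga wysokość wieży zaczynającej się w i a mającej szczyt w b
--     F = [[[[0, 0], 0] for _ in range(n)] for _ in range(n)]
--     for x in range(n):
--         F[x][x] = [A[x], 1]
--
--     for i in range(n):
--         for j in range(i+1, n):
--             if A[j][0] >= F[i][i][0][0] and A[j][1] <= F[i][i][0][1]:
--                 for x in range(i, j):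
--                     if A[j][0] >= F[i][x][0][0] and A[j][1] <= F[i][x][0][1]:
--                         if F[i][j][1] < F[i][x][1] + 1:
--                             F[i][j][1] = F[i][x][1] + 1
--                             F[i][j][0][0] = A[j][0]
--                             F[i][j][0][1] = A[j][1]
--
--     best = 0
--     for x in range(n):
--         for y in range(x+1, n):
--             best = max(best, F[x][y][1])
--
--     return best
-- ===== SOURCE B (Python) =====
-- def tower(A):
--     # One O(n^2) pass: dp[j] = longest width-nondecreasing/height-nonincreasing
--     # chain ending at j; best tracks chains of >= 2 blocks (A reports 0 otherwise).
--     n = len(A)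
--     dp = [1] * n
--     best = 0
--     for j in range(n):
--         m = 0
--         for x in range(j):
--             if A[j][0] >= A[x][0] and A[j][1] <= A[x][1] and dp[x] > m:
--                 m = dp[x]
--         if m:
--             dp[j] = m + 1
--             if dp[j] > best:
--                 best = dp[j]
--     return best
-- ===== Notes on version B (the rewrite author's own statement) =====
-- stated objective: faster
-- what changed: Replaced the O(n^3) table F[i][j] indexed by a redundant chain start i with a single O(n^2) dp[j] = longest width-nondecreasing/height-nonincreasing chain ending at j, tracking the best chain of >= 2 blocks.
import Mathlib
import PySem

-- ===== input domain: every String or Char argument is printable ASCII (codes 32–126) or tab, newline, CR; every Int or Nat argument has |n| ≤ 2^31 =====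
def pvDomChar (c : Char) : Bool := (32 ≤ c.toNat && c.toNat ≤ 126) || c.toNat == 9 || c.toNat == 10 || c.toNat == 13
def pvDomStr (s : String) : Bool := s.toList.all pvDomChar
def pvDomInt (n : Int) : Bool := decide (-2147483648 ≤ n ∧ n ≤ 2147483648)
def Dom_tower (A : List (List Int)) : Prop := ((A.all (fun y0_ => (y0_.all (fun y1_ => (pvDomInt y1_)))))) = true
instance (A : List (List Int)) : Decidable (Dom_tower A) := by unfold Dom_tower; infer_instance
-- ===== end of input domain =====

-- B replaces A's O(n^3) start-indexed table F[i][j] by one O(n^2) dp over chain ends;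
-- proved to return the same value on every input where the Python A returns (Pre_tower).


-- ===== PORT A =====
-- A[j][k] as read by both Pythons; under Pre_tower every read index is in range, so getD is exact.
def pvG (A : List (List Int)) (j k : Nat) : Int := (A.getD j []).getD k 0

-- the fresh cell [[0, 0], 0]
def pvCell0 : List Int × Int := ([0, 0], 0)

-- the body of A's 'for j in range(i+1, n)' loop: it reads and writes only row i of F,
-- so it is written as a function of that row (the in-place mutation of Python's F[i]).
def towerRow (A : List (List Int)) (i : Nat) (r : List (List Int × Int)) : List (List Int × Int) :=
  (List.range' (i+1) (A.length - (i+1))).foldl (fun r j =>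
    if pvG A j 0 ≥ (r.getD i pvCell0).1.getD 0 0 ∧ pvG A j 1 ≤ (r.getD i pvCell0).1.getD 1 0 then
      (List.range' i (j - i)).foldl (fun r x =>
        if pvG A j 0 ≥ (r.getD x pvCell0).1.getD 0 0 ∧ pvG A j 1 ≤ (r.getD x pvCell0).1.getD 1 0 then
          if (r.getD j pvCell0).2 < (r.getD x pvCell0).2 + 1 then
            r.set j ((((r.getD j pvCell0).1.set 0 (pvG A j 0)).set 1 (pvG A j 1)), (r.getD x pvCell0).2 + 1)
          else r
        else r) r
    else r) r

def tower (A : List (List Int)) : Int :=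
  let n := A.length
  let F0 := List.replicate n (List.replicate n pvCell0)
  let F1 := (List.range n).foldl (fun F x => F.set x ((F.getD x []).set x (A.getD x [], (1 : Int)))) F0
  let F2 := (List.range n).foldl (fun F i => F.set i (towerRow A i (F.getD i []))) F1
  (List.range n).foldl (fun best x =>
    (List.range' (x+1) (n - (x+1))).foldl (fun best y => max best ((F2.getD x []).getD y pvCell0).2) best) 0

-- ===== PORT B =====
def tower_alt (A : List (List Int)) : Int :=
  let n := A.length
  ((List.range n).foldl (fun (s : List Int × Int) j =>
      let m := (List.range j).foldl (fun m x =>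
        if pvG A j 0 ≥ pvG A x 0 ∧ pvG A j 1 ≤ pvG A x 1 ∧ s.1.getD x 0 > m then s.1.getD x 0 else m) 0
      if m ≠ 0 then (s.1.set j (m+1), if m+1 > s.2 then m+1 else s.2) else s)
    (List.replicate n 1, (0 : Int))).2

-- ===== PRECONDITION & SPEC =====
-- Pre_tower excludes exactly the inputs on which the Python A raises IndexError: with n ≥ 2 every
-- row is read at index 0, and rows x < j with A[x][0] <= A[j][0] are also read at index 1.
def Pre_tower (A : List (List Int)) : Prop :=
  A.length ≤ 1 ∨
  ∀ j < A.length, ∀ x < j,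
    (1 ≤ (A.getD x []).length ∧ 1 ≤ (A.getD j []).length) ∧
    ((A.getD x []).getD 0 0 ≤ (A.getD j []).getD 0 0 →
      2 ≤ (A.getD x []).length ∧ 2 ≤ (A.getD j []).length)
instance (A : List (List Int)) : Decidable (Pre_tower A) := by unfold Pre_tower; infer_instance

def pvWitness_tower : List (List Int) := [[3, 5], [4, 4], [4, 2]]

def Spec_tower (A : List (List Int)) (out : Int) : Prop := out = tower_alt A
instance (A : List (List Int)) (out : Int) : Decidable (Spec_tower A out) := by unfold Spec_tower; infer_instance

-- ===== CLAIM (what is proved, stated in full; the proofs are below) =====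
def Claim_equal_tower : Prop := ∀ (A : List (List Int)), Dom_tower A → Pre_tower A → Spec_tower A (tower A)

-- ===== LEMMAS AND PROOFS =====

-- blocks x and j are compatible (j may hang below x): width up, height down
abbrev pvCompat (A : List (List Int)) (x j : Nat) : Prop :=
  pvG A x 0 ≤ pvG A j 0 ∧ pvG A j 1 ≤ pvG A x 1

lemma pvCompat_trans {A : List (List Int)} {x y z : Nat}
    (h1 : pvCompat A x y) (h2 : pvCompat A y z) : pvCompat A x z :=
  ⟨le_trans h1.1 h2.1, le_trans h2.2 h1.2⟩

-- B's dp value: length of the longest compatible chain ending at j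
def pvD (A : List (List Int)) : Nat → Int
  | j => 1 + (List.range j).attach.foldl
      (fun m x => if pvCompat A x.1 j ∧ pvD A x.1 > m then pvD A x.1 else m) 0
  termination_by j => j
  decreasing_by exact List.mem_range.mp x.2

def pvM (A : List (List Int)) (j : Nat) : Int :=
  (List.range j).foldl (fun m x => if pvCompat A x j ∧ pvD A x > m then pvD A x else m) 0

-- A's window value: height of cell F[i][j] when the guard pvCompat i j holds
def pvW (A : List (List Int)) (i : Nat) : Nat → Int
  | j => (List.range' (i+1) (j - (i+1))).attach.foldl
      (fun h x => if (pvCompat A x.1 j ∧ pvCompat A i x.1) ∧ pvW A i x.1 + 1 > h then pvW A i x.1 + 1 else h) 2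
  termination_by j => j
  decreasing_by
    have := List.mem_range'_1.mp x.2
    omega

-- B's running best
def pvBest (A : List (List Int)) : Nat → Int
  | 0 => 0
  | k+1 => if pvM A k ≠ 0 then max (pvBest A k) (1 + pvM A k) else pvBest A k

lemma pvD_eq (A : List (List Int)) (j : Nat) : pvD A j = 1 + pvM A j := by
  conv_lhs => rw [pvD]
  rw [List.foldl_attach (f := fun m x => if pvCompat A x j ∧ pvD A x > m then pvD A x else m)]
  rfl

lemma pvW_eq (A : List (List Int)) (i j : Nat) :
    pvW A i j = (List.range' (i+1) (j - (i+1))).foldl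
      (fun h x => if (pvCompat A x j ∧ pvCompat A i x) ∧ pvW A i x + 1 > h then pvW A i x + 1 else h) 2 := by
  conv_lhs => rw [pvW]
  rw [List.foldl_attach (f := fun h x => if (pvCompat A x j ∧ pvCompat A i x) ∧ pvW A i x + 1 > h then pvW A i x + 1 else h)]

-- generic lemmas about the fold 'm = max of v x over x with c x' --------------------------------

lemma pvCondfold_le_iff {α : Type} (c : α → Prop) [DecidablePred c] (v : α → Int)
    (l : List α) (m0 z : Int) :
    l.foldl (fun m x => if c x ∧ v x > m then v x else m) m0 ≤ z ↔
      m0 ≤ z ∧ ∀ x ∈ l, c x → v x ≤ z := by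
  induction l generalizing m0 with
  | nil => simp
  | cons a t ih =>
    simp only [List.foldl_cons, ih, List.mem_cons]
    by_cases hc : c a
    · by_cases hv : v a > m0
      · simp only [if_pos (⟨hc, hv⟩ : c a ∧ v a > m0)]
        constructor
        · rintro ⟨h1, h2⟩
          exact ⟨le_trans (le_of_lt hv) h1, fun x hx hcx => by
            rcases hx with rfl | hx
            · exact h1
            · exact h2 x hx hcx⟩
        · rintro ⟨h1, h2⟩
          exact ⟨h2 a (Or.inl rfl) hc, fun x hx hcx => h2 x (Or.inr hx) hcx⟩
      · have : ¬ (c a ∧ v a > m0) := by tauto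
        simp only [if_neg this]
        constructor
        · rintro ⟨h1, h2⟩
          exact ⟨h1, fun x hx hcx => by
            rcases hx with rfl | hx
            · omega
            · exact h2 x hx hcx⟩
        · rintro ⟨h1, h2⟩
          exact ⟨h1, fun x hx hcx => h2 x (Or.inr hx) hcx⟩
    · have : ¬ (c a ∧ v a > m0) := by tauto
      simp only [if_neg this]
      constructor
      · rintro ⟨h1, h2⟩
        exact ⟨h1, fun x hx hcx => by
          rcases hx with rfl | hx
          · exact absurd hcx hc
          · exact h2 x hx hcx⟩
      · rintro ⟨h1, h2⟩
        exact ⟨h1, fun x hx hcx => h2 x (Or.inr hx) hcx⟩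

lemma pvCondfold_init_le {α : Type} (c : α → Prop) [DecidablePred c] (v : α → Int)
    (l : List α) (m0 : Int) :
    m0 ≤ l.foldl (fun m x => if c x ∧ v x > m then v x else m) m0 := by
  have h := (pvCondfold_le_iff c v l m0 (l.foldl (fun m x => if c x ∧ v x > m then v x else m) m0)).mp le_rfl
  exact h.1

lemma pvCondfold_mem_le {α : Type} (c : α → Prop) [DecidablePred c] (v : α → Int)
    (l : List α) (m0 : Int) {x : α} (hx : x ∈ l) (hc : c x) :
    v x ≤ l.foldl (fun m x => if c x ∧ v x > m then v x else m) m0 := by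
  have h := (pvCondfold_le_iff c v l m0 (l.foldl (fun m x => if c x ∧ v x > m then v x else m) m0)).mp le_rfl
  exact h.2 x hx hc

lemma pvCondfold_reach {α : Type} (c : α → Prop) [DecidablePred c] (v : α → Int)
    (l : List α) (m0 : Int) :
    l.foldl (fun m x => if c x ∧ v x > m then v x else m) m0 = m0 ∨
      ∃ x ∈ l, c x ∧ l.foldl (fun m x => if c x ∧ v x > m then v x else m) m0 = v x := by
  induction l generalizing m0 with
  | nil => simp
  | cons a t ih =>
    simp only [List.foldl_cons]
    by_cases h : c a ∧ v a > m0
    · rw [if_pos h]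
      rcases ih (v a) with h1 | ⟨x, hx, hcx, h2⟩
      · exact Or.inr ⟨a, List.mem_cons_self .., h.1, h1⟩
      · exact Or.inr ⟨x, List.mem_cons_of_mem _ hx, hcx, h2⟩
    · rw [if_neg h]
      rcases ih m0 with h1 | ⟨x, hx, hcx, h2⟩
      · exact Or.inl h1
      · exact Or.inr ⟨x, List.mem_cons_of_mem _ hx, hcx, h2⟩

-- generic lemmas about running-max folds and nested folds ---------------------------------------

lemma pvMaxfold_le_iff {α : Type} (v : α → Int) (l : List α) (b0 z : Int) :
    l.foldl (fun b p => max b (v p)) b0 ≤ z ↔ b0 ≤ z ∧ ∀ p ∈ l, v p ≤ z := by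
  induction l generalizing b0 with
  | nil => simp
  | cons a t ih =>
    simp only [List.foldl_cons, ih, List.mem_cons]
    constructor
    · rintro ⟨h1, h2⟩
      exact ⟨le_trans (le_max_left _ _) h1, fun p hp => by
        rcases hp with rfl | hp
        · exact le_trans (le_max_right _ _) h1
        · exact h2 p hp⟩
    · rintro ⟨h1, h2⟩
      exact ⟨max_le h1 (h2 a (Or.inl rfl)), fun p hp => h2 p (Or.inr hp)⟩

lemma pvMaxfold_init_le {α : Type} (v : α → Int) (l : List α) (b0 : Int) :
    b0 ≤ l.foldl (fun b p => max b (v p)) b0 := by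
  have h := (pvMaxfold_le_iff v l b0 (l.foldl (fun b p => max b (v p)) b0)).mp le_rfl
  exact h.1

lemma pvMaxfold_mem_le {α : Type} (v : α → Int) (l : List α) (b0 : Int) {p : α} (hp : p ∈ l) :
    v p ≤ l.foldl (fun b p => max b (v p)) b0 := by
  have h := (pvMaxfold_le_iff v l b0 (l.foldl (fun b p => max b (v p)) b0)).mp le_rfl
  exact h.2 p hp

lemma pvNested_init_le {α : Type} (g : Int → α → Int) (l : List α) (b0 : Int)
    (hinfl : ∀ b x, b ≤ g b x) : b0 ≤ l.foldl g b0 := by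
  induction l generalizing b0 with
  | nil => simp
  | cons a t ih => exact le_trans (hinfl b0 a) (ih _)

lemma pvNested_mem_le {α : Type} (g : Int → α → Int) (l : List α) (b0 c : Int)
    (hinfl : ∀ b x, b ≤ g b x) {x0 : α} (hx : x0 ∈ l) (hc : ∀ b, c ≤ g b x0) :
    c ≤ l.foldl g b0 := by
  obtain ⟨t1, t2, rfl⟩ := List.append_of_mem hx
  rw [List.foldl_append, List.foldl_cons]
  exact le_trans (hc _) (pvNested_init_le g t2 _ hinfl)

lemma pvNested_le {α : Type} (g : Int → α → Int) (l : List α) (b0 z : Int)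
    (h0 : b0 ≤ z) (hstep : ∀ b x, b ≤ z → g b x ≤ z) : l.foldl g b0 ≤ z := by
  induction l generalizing b0 with
  | nil => simpa using h0
  | cons a t ih => exact ih _ (hstep b0 a h0)

-- basic facts about pvD / pvM / pvW / pvBest ----------------------------------------------------

lemma pvM_nonneg (A : List (List Int)) (j : Nat) : 0 ≤ pvM A j :=
  pvCondfold_init_le _ _ _ _

lemma pvD_pos (A : List (List Int)) (j : Nat) : 1 ≤ pvD A j := by
  rw [pvD_eq]
  have := pvM_nonneg A j
  omega

lemma pvM_mem_le (A : List (List Int)) {x j : Nat} (hx : x < j) (hc : pvCompat A x j) :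
    pvD A x ≤ pvM A j :=
  pvCondfold_mem_le _ _ _ _ (List.mem_range.mpr hx) hc

lemma pvM_reach (A : List (List Int)) (j : Nat) :
    pvM A j = 0 ∨ ∃ x, x < j ∧ pvCompat A x j ∧ pvM A j = pvD A x := by
  rcases pvCondfold_reach (fun x => pvCompat A x j) (pvD A) (List.range j) 0 with h | ⟨x, hx, hc, h⟩
  · exact Or.inl h
  · exact Or.inr ⟨x, List.mem_range.mp hx, hc, h⟩

lemma pvW_ge_two (A : List (List Int)) (i j : Nat) : 2 ≤ pvW A i j := by
  rw [pvW_eq]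
  exact pvCondfold_init_le _ _ _ _

-- L1: every window chain value is at most B's dp value at its end
lemma pvW_le_pvD (A : List (List Int)) : ∀ j, ∀ i, i < j → pvCompat A i j → pvW A i j ≤ pvD A j := by
  intro j
  induction j using Nat.strong_induction_on with
  | _ j ih =>
    intro i hij hc
    rw [pvW_eq, pvCondfold_le_iff]
    constructor
    · have h1 := pvM_mem_le A hij hc
      have h2 := pvD_pos A i
      rw [pvD_eq]
      omega
    · intro x hx ⟨hxj, hix⟩
      have hx' := List.mem_range'_1.mp hx
      have hxlt : x < j := by omega
      have h1 : pvW A i x ≤ pvD A x := ih x hxlt i (by omega) hix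
      have h2 : pvD A x ≤ pvM A j := pvM_mem_le A hxlt hxj
      rw [pvD_eq]
      omega

-- L2: B's dp value at j is attained by some window F[i][j]
lemma pvD_attained (A : List (List Int)) :
    ∀ j, 0 < pvM A j → ∃ i, i < j ∧ pvCompat A i j ∧ pvW A i j = pvD A j := by
  intro j
  induction j using Nat.strong_induction_on with
  | _ j ih =>
    intro hpos
    rcases pvM_reach A j with h | ⟨x, hxj, hxc, hx⟩
    · omega
    · by_cases hx0 : 0 < pvM A x
      · obtain ⟨i, hix, hic, hiw⟩ := ih x hxj hx0
        refine ⟨i, by omega, pvCompat_trans hic hxc, le_antisymm (pvW_le_pvD A j i (by omega) (pvCompat_trans hic hxc)) ?_⟩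
        have hxmem : x ∈ List.range' (i+1) (j - (i+1)) := by
          rw [List.mem_range'_1]
          omega
        have hmem : pvW A i x + 1 ≤ pvW A i j := by
          conv_rhs => rw [pvW_eq]
          exact pvCondfold_mem_le (c := fun y => pvCompat A y j ∧ pvCompat A i y)
            (v := fun y => pvW A i y + 1) _ 2 hxmem ⟨hxc, hic⟩
        rw [pvD_eq, hx, ← hiw]
        omega
      · have hDx : pvD A x = 1 := by
          have := pvM_nonneg A x
          rw [pvD_eq]
          omega
        refine ⟨x, hxj, hxc, le_antisymm (pvW_le_pvD A j x hxj hxc) ?_⟩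
        have h2 := pvW_ge_two A x j
        rw [hDx] at hx
        rw [pvD_eq, hx]
        omega

lemma pvBest_nonneg (A : List (List Int)) (k : Nat) : 0 ≤ pvBest A k := by
  induction k with
  | zero => simp [pvBest]
  | succ k ih =>
    rw [pvBest]
    split
    · exact le_trans ih (le_max_left _ _)
    · exact ih

lemma pvBest_mem_le (A : List (List Int)) {j k : Nat} (hj : j < k) (hm : pvM A j ≠ 0) :
    pvD A j ≤ pvBest A k := by
  induction k with
  | zero => omega
  | succ k ih =>
    rw [pvBest]
    rcases Nat.lt_succ_iff_lt_or_eq.mp hj with h | rfl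
    · split
      · exact le_trans (ih h) (le_max_left _ _)
      · exact ih h
    · rw [if_pos hm, pvD_eq]
      exact le_max_right _ _

lemma pvBest_le_iff (A : List (List Int)) (k : Nat) (z : Int) :
    pvBest A k ≤ z ↔ 0 ≤ z ∧ ∀ j < k, pvM A j ≠ 0 → pvD A j ≤ z := by
  induction k with
  | zero => simp [pvBest]
  | succ k ih =>
    rw [pvBest]
    by_cases hm : pvM A k ≠ 0
    · rw [if_pos hm, max_le_iff, ih]
      constructor
      · rintro ⟨⟨h0, h1⟩, h2⟩
        refine ⟨h0, fun j hj hmj => ?_⟩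
        rcases Nat.lt_succ_iff_lt_or_eq.mp hj with h | rfl
        · exact h1 j h hmj
        · rw [pvD_eq]; exact h2
      · rintro ⟨h0, h1⟩
        exact ⟨⟨h0, fun j hj hmj => h1 j (by omega) hmj⟩, by rw [← pvD_eq]; exact h1 k (by omega) hm⟩
    · rw [if_neg hm, ih]
      constructor
      · rintro ⟨h0, h1⟩
        refine ⟨h0, fun j hj hmj => ?_⟩
        rcases Nat.lt_succ_iff_lt_or_eq.mp hj with h | rfl
        · exact h1 j h hmj
        · exact absurd hmj hm
      · rintro ⟨h0, h1⟩
        exact ⟨h0, fun j hj hmj => h1 j (by omega) hmj⟩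

-- port B computes pvBest -------------------------------------------------------------------------

lemma pvMapRange_getD (n x : Nat) (f : Nat → Int) (hx : x < n) :
    ((List.range n).map f).getD x 0 = f x := by
  simp [List.getD_eq_getElem?_getD, hx]

lemma pvAlt_inv (A : List (List Int)) (n : Nat) (hn : n = A.length) :
    ∀ k, k ≤ n →
    (List.range k).foldl (fun (s : List Int × Int) j =>
        let m := (List.range j).foldl (fun m x =>
          if pvG A j 0 ≥ pvG A x 0 ∧ pvG A j 1 ≤ pvG A x 1 ∧ s.1.getD x 0 > m then s.1.getD x 0 else m) 0
        if m ≠ 0 then (s.1.set j (m+1), if m+1 > s.2 then m+1 else s.2) else s)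
      (List.replicate n 1, (0 : Int))
    = ((List.range n).map (fun x => if x < k then pvD A x else 1), pvBest A k) := by
  intro k
  induction k with
  | zero =>
    intro _
    simp [pvBest]
  | succ k ih =>
    intro hk
    rw [List.range_succ, List.foldl_append, List.foldl_cons, List.foldl_nil, ih (by omega)]
    have hm : (List.range k).foldl (fun m x =>
        if pvG A k 0 ≥ pvG A x 0 ∧ pvG A k 1 ≤ pvG A x 1 ∧
            ((List.range n).map (fun x => if x < k then pvD A x else 1)).getD x 0 > m
        then ((List.range n).map (fun x => if x < k then pvD A x else 1)).getD x 0 else m) 0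
        = pvM A k := by
      unfold pvM
      refine PySem.List.foldl_congr_mem _ _ _ _ ?_
      intro acc x hx
      have hx' := List.mem_range.mp hx
      rw [pvMapRange_getD n x _ (by omega), if_pos (by omega : x < k)]
      simp [pvCompat, ge_iff_le, and_assoc]
    simp only [hm]
    by_cases hz : pvM A k ≠ 0
    · rw [if_pos hz]
      have hset : ((List.range n).map (fun x => if x < k then pvD A x else 1)).set k (pvM A k + 1)
          = (List.range n).map (fun x => if x < k + 1 then pvD A x else 1) := by
        apply List.ext_getElem
        · simp
        · intro idx h1 h2
          simp only [List.getElem_set, List.getElem_map, List.getElem_range]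
          by_cases hik : k = idx
          · subst hik
            rw [if_pos rfl, if_pos (by simp at h1; omega), pvD_eq]
            ring
          · rw [if_neg hik]
            split_ifs <;> first | rfl | omega
      have hbest : (if pvM A k + 1 > pvBest A k then pvM A k + 1 else pvBest A k)
          = pvBest A (k+1) := by
        rw [pvBest, if_pos hz, Int.max_def]
        split_ifs <;> omega
      rw [hset, hbest]
    · rw [if_neg hz]
      have hz' : pvM A k = 0 := not_ne_iff.mp hz
      have hD : pvD A k = 1 := by rw [pvD_eq, hz']; ring
      have hmap : (List.range n).map (fun x => if x < k then pvD A x else 1)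
          = (List.range n).map (fun x => if x < k + 1 then pvD A x else 1) := by
        apply List.map_congr_left
        intro x hx
        by_cases hxk : x = k
        · subst hxk
          rw [if_neg (by omega), if_pos (by omega), hD]
        · split_ifs <;> first | rfl | omega
      have hb : pvBest A k = pvBest A (k+1) := by rw [pvBest, if_neg hz]
      rw [hmap, hb]


lemma tower_alt_eq (A : List (List Int)) : tower_alt A = pvBest A A.length := by
  have h := pvAlt_inv A A.length rfl A.length le_rfl
  show ((List.range A.length).foldl _ (List.replicate A.length 1, (0:Int))).2 = _
  rw [h]

-- port A computes the nested max over window values ----------------------------------------------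

lemma pvGetD_set_self {C : Type} (l : List C) (i : Nat) (a d : C) (h : i < l.length) :
    (l.set i a).getD i d = a := by
  simp [List.getD_eq_getElem?_getD, h]

lemma pvGetD_set_ne {C : Type} (l : List C) (i j : Nat) (a d : C) (h : i ≠ j) :
    (l.set i a).getD j d = l.getD j d := by
  simp [List.getD_eq_getElem?_getD, h]

lemma pvRowfold {C : Type} (h : Nat → List C → List C) (F0 : List (List C)) (k : Nat) :
    ((List.range k).foldl (fun F t => F.set t (h t (F.getD t []))) F0).length = F0.length ∧
    ∀ i, i < F0.length →
      ((List.range k).foldl (fun F t => F.set t (h t (F.getD t []))) F0).getD i []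
        = if i < k then h i (F0.getD i []) else F0.getD i [] := by
  induction k with
  | zero => simp
  | succ k ih =>
    obtain ⟨hlen, hcell⟩ := ih
    rw [List.range_succ, List.foldl_append, List.foldl_cons, List.foldl_nil]
    constructor
    · rw [List.length_set, hlen]
    · intro i hi
      by_cases hik : i = k
      · subst hik
        rw [pvGetD_set_self _ _ _ _ (by omega), hcell i hi, if_neg (by omega), if_pos (by omega)]
      · rw [pvGetD_set_ne _ _ _ _ _ (fun hh => hik hh.symm), hcell i hi]
        split_ifs <;> first | rfl | omega

-- the value of cell F[i][t] (t ≠ i) after A's row-i pass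
def pvRowCell (A : List (List Int)) (i t : Nat) : List Int × Int :=
  if pvCompat A i t then ([pvG A t 0, pvG A t 1], pvW A i t) else pvCell0

lemma towerRow_inner (A : List (List Int)) (i j : Nat) (r : List (List Int × Int))
    (hr : j < r.length)
    (hcells : ∀ x, i < x → x < j → r.getD x pvCell0 = pvRowCell A i x) :
    ∀ (l : List Nat), (∀ x ∈ l, i < x ∧ x < j) → ∀ (h : Int), 2 ≤ h →
    l.foldl (fun r x =>
        if pvG A j 0 ≥ (r.getD x pvCell0).1.getD 0 0 ∧ pvG A j 1 ≤ (r.getD x pvCell0).1.getD 1 0 then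
          if (r.getD j pvCell0).2 < (r.getD x pvCell0).2 + 1 then
            r.set j ((((r.getD j pvCell0).1.set 0 (pvG A j 0)).set 1 (pvG A j 1)), (r.getD x pvCell0).2 + 1)
          else r
        else r) (r.set j ([pvG A j 0, pvG A j 1], h))
    = r.set j ([pvG A j 0, pvG A j 1],
        l.foldl (fun h x => if (pvCompat A x j ∧ pvCompat A i x) ∧ pvW A i x + 1 > h then pvW A i x + 1 else h) h) := by
  intro l
  induction l with
  | nil => intro _ h _; simp
  | cons a t ih =>
    intro hl h hh
    obtain ⟨hai, haj⟩ := hl a (List.mem_cons_self ..)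
    simp only [List.foldl_cons]
    have hga : (r.set j ([pvG A j 0, pvG A j 1], h)).getD a pvCell0 = pvRowCell A i a := by
      rw [pvGetD_set_ne _ _ _ _ _ (by omega)]
      exact hcells a hai haj
    have hgj : (r.set j ([pvG A j 0, pvG A j 1], h)).getD j pvCell0 = ([pvG A j 0, pvG A j 1], h) :=
      pvGetD_set_self _ _ _ _ hr
    rw [hga, hgj]
    by_cases hia : pvCompat A i a
    · rw [pvRowCell, if_pos hia]
      by_cases hajc : pvCompat A a j
      · rw [if_pos (by simpa using ⟨hajc.1, hajc.2⟩)]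
        by_cases hlt : h < pvW A i a + 1
        · rw [if_pos (by simpa using hlt)]
          have hres : ((r.set j ([pvG A j 0, pvG A j 1], h)).set j
              ((([pvG A j 0, pvG A j 1].set 0 (pvG A j 0)).set 1 (pvG A j 1)),
                ([pvG A a 0, pvG A a 1], pvW A i a).2 + 1))
              = r.set j ([pvG A j 0, pvG A j 1], pvW A i a + 1) := by
            rw [List.set_set]
            norm_num [List.set]
          rw [hres, if_pos ⟨⟨hajc, hia⟩, by omega⟩]
          exact ih (fun x hx => hl x (List.mem_cons_of_mem _ hx)) _ (by have := pvW_ge_two A i a; omega)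
        · rw [if_neg (by simpa using hlt), if_neg (by omega)]
          exact ih (fun x hx => hl x (List.mem_cons_of_mem _ hx)) _ hh
      · rw [if_neg (fun hc => hajc ⟨by simpa using hc.1, by simpa using hc.2⟩),
            if_neg (fun hc => hajc hc.1.1)]
        exact ih (fun x hx => hl x (List.mem_cons_of_mem _ hx)) _ hh
    · rw [pvRowCell, if_neg hia]
      rw [if_neg (show ¬ ((pvCompat A a j ∧ pvCompat A i a) ∧ pvW A i a + 1 > h) from
        fun hc => hia hc.1.2)]
      by_cases hc0 : pvG A j 0 ≥ (pvCell0.1.getD 0 0 : Int) ∧ pvG A j 1 ≤ (pvCell0.1.getD 1 0 : Int)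
      · rw [if_pos hc0,
          if_neg (show ¬ (([pvG A j 0, pvG A j 1], h).2 < pvCell0.2 + 1) by simp [pvCell0]; omega)]
        exact ih (fun x hx => hl x (List.mem_cons_of_mem _ hx)) _ hh
      · rw [if_neg hc0]
        exact ih (fun x hx => hl x (List.mem_cons_of_mem _ hx)) _ hh


def pvV (A : List (List Int)) (x y : Nat) : Int := if pvCompat A x y then pvW A x y else 0


lemma towerRow_inv (A : List (List Int)) (i : Nat) (hi : i < A.length) :
    ∀ k, k ≤ A.length - (i+1) →
    (((List.range' (i+1) k).foldl (fun r j =>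
        if pvG A j 0 ≥ (r.getD i pvCell0).1.getD 0 0 ∧ pvG A j 1 ≤ (r.getD i pvCell0).1.getD 1 0 then
          (List.range' i (j - i)).foldl (fun r x =>
            if pvG A j 0 ≥ (r.getD x pvCell0).1.getD 0 0 ∧ pvG A j 1 ≤ (r.getD x pvCell0).1.getD 1 0 then
              if (r.getD j pvCell0).2 < (r.getD x pvCell0).2 + 1 then
                r.set j ((((r.getD j pvCell0).1.set 0 (pvG A j 0)).set 1 (pvG A j 1)), (r.getD x pvCell0).2 + 1)
              else r
            else r) r
        else r)
      ((List.replicate A.length pvCell0).set i (A.getD i [], 1))).length = A.length) ∧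
    ∀ t, t < A.length →
      ((List.range' (i+1) k).foldl (fun r j =>
        if pvG A j 0 ≥ (r.getD i pvCell0).1.getD 0 0 ∧ pvG A j 1 ≤ (r.getD i pvCell0).1.getD 1 0 then
          (List.range' i (j - i)).foldl (fun r x =>
            if pvG A j 0 ≥ (r.getD x pvCell0).1.getD 0 0 ∧ pvG A j 1 ≤ (r.getD x pvCell0).1.getD 1 0 then
              if (r.getD j pvCell0).2 < (r.getD x pvCell0).2 + 1 then
                r.set j ((((r.getD j pvCell0).1.set 0 (pvG A j 0)).set 1 (pvG A j 1)), (r.getD x pvCell0).2 + 1)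
              else r
            else r) r
        else r)
      ((List.replicate A.length pvCell0).set i (A.getD i [], 1))).getD t pvCell0
        = if t = i then (A.getD i [], 1)
          else if i < t ∧ t < i+1+k then pvRowCell A i t else pvCell0 := by
  intro k
  induction k with
  | zero =>
    intro _
    constructor
    · rw [List.range'_zero, List.foldl_nil, List.length_set, List.length_replicate]
    · intro t ht
      rw [List.range'_zero, List.foldl_nil]
      by_cases hti : t = i
      · subst hti
        rw [if_pos rfl, pvGetD_set_self _ _ _ _ (by simpa using hi)]
      · rw [if_neg hti, pvGetD_set_ne _ _ _ _ _ (fun hh => hti hh.symm),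
          List.getD_replicate _ ht, if_neg (by omega)]
  | succ k ih =>
    intro hk
    obtain ⟨hlen, hcell⟩ := ih (by omega)
    have hj : i + 1 + k < A.length := by omega
    rw [show List.range' (i+1) (k+1) = List.range' (i+1) k ++ [i+1+k] by
          rw [List.range'_concat]; norm_num,
        List.foldl_append, List.foldl_cons, List.foldl_nil]
    -- the accumulated row
    set r := (List.range' (i+1) k).foldl (fun r j =>
        if pvG A j 0 ≥ (r.getD i pvCell0).1.getD 0 0 ∧ pvG A j 1 ≤ (r.getD i pvCell0).1.getD 1 0 then
          (List.range' i (j - i)).foldl (fun r x =>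
            if pvG A j 0 ≥ (r.getD x pvCell0).1.getD 0 0 ∧ pvG A j 1 ≤ (r.getD x pvCell0).1.getD 1 0 then
              if (r.getD j pvCell0).2 < (r.getD x pvCell0).2 + 1 then
                r.set j ((((r.getD j pvCell0).1.set 0 (pvG A j 0)).set 1 (pvG A j 1)), (r.getD x pvCell0).2 + 1)
              else r
            else r) r
        else r)
      ((List.replicate A.length pvCell0).set i (A.getD i [], 1)) with hr
    have hri : r.getD i pvCell0 = (A.getD i [], 1) := by
      rw [hcell i hi, if_pos rfl]
    have hrj : r.getD (i+1+k) pvCell0 = pvCell0 := by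
      rw [hcell (i+1+k) hj, if_neg (by omega), if_neg (by omega)]
    by_cases hcij : pvCompat A i (i+1+k)
    · rw [hri]
      rw [if_pos (show pvG A (i+1+k) 0 ≥ (A.getD i [], (1:Int)).1.getD 0 0 ∧
            pvG A (i+1+k) 1 ≤ (A.getD i [], (1:Int)).1.getD 1 0 from ⟨hcij.1, hcij.2⟩)]
      rw [show (i+1+k) - i = k + 1 by omega, List.range'_succ, List.foldl_cons]
      rw [hri, hrj]
      rw [if_pos (show pvG A (i+1+k) 0 ≥ (A.getD i [], (1:Int)).1.getD 0 0 ∧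
            pvG A (i+1+k) 1 ≤ (A.getD i [], (1:Int)).1.getD 1 0 from ⟨hcij.1, hcij.2⟩)]
      rw [if_pos (show (pvCell0).2 < (A.getD i [], (1:Int)).2 + 1 by norm_num [pvCell0])]
      have hset : r.set (i+1+k) (((pvCell0.1.set 0 (pvG A (i+1+k) 0)).set 1 (pvG A (i+1+k) 1)),
            (A.getD i [], (1:Int)).2 + 1)
          = r.set (i+1+k) ([pvG A (i+1+k) 0, pvG A (i+1+k) 1], 2) := by
        norm_num [pvCell0, List.set]
      rw [hset]
      have hinner := towerRow_inner A i (i+1+k) r (by omega)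
        (fun x hx1 hx2 => by
          rw [hcell x (by omega), if_neg (by omega), if_pos (by omega)])
        (List.range' (i+1) k)
        (fun x hx => by have := List.mem_range'_1.mp hx; omega)
        2 le_rfl
      rw [hinner]
      have hw : (List.range' (i+1) k).foldl
          (fun h x => if (pvCompat A x (i+1+k) ∧ pvCompat A i x) ∧ pvW A i x + 1 > h
            then pvW A i x + 1 else h) 2 = pvW A i (i+1+k) := by
        rw [pvW_eq, show (i+1+k) - (i+1) = k by omega]
      rw [hw]
      constructor
      · rw [List.length_set, hlen]
      · intro t ht
        by_cases htj : t = i+1+k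
        · subst htj
          rw [pvGetD_set_self _ _ _ _ (by omega), if_neg (by omega), if_pos (by omega),
            pvRowCell, if_pos hcij]
        · rw [pvGetD_set_ne _ _ _ _ _ (fun hh => htj hh.symm), hcell t ht]
          by_cases hti : t = i
          · rw [if_pos hti, if_pos hti]
          · rw [if_neg hti, if_neg hti]
            split_ifs <;> first | rfl | omega
    · rw [hri]
      rw [if_neg (show ¬ (pvG A (i+1+k) 0 ≥ (A.getD i [], (1:Int)).1.getD 0 0 ∧
            pvG A (i+1+k) 1 ≤ (A.getD i [], (1:Int)).1.getD 1 0) from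
          fun hc => hcij ⟨hc.1, hc.2⟩)]
      refine ⟨hlen, fun t ht => ?_⟩
      rw [hcell t ht]
      by_cases hti : t = i
      · rw [if_pos hti, if_pos hti]
      · rw [if_neg hti, if_neg hti]
        by_cases htj : t = i+1+k
        · subst htj
          rw [if_neg (by omega), if_pos (by omega), pvRowCell, if_neg hcij]
        · split_ifs <;> first | rfl | omega

lemma tower_eq (A : List (List Int)) :
    tower A = (List.range A.length).foldl (fun best x =>
      (List.range' (x+1) (A.length - (x+1))).foldl (fun best y => max best (pvV A x y)) best) 0 := by
  simp only [tower]
  refine PySem.List.foldl_congr_mem _ _ _ _ ?_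
  intro acc x hx
  have hxn := List.mem_range.mp hx
  refine PySem.List.foldl_congr_mem _ _ _ _ ?_
  intro acc2 y hy
  have hy' := List.mem_range'_1.mp hy
  have hxy : x < y ∧ y < A.length := by omega
  congr 1
  obtain ⟨h1len, h1cell⟩ := pvRowfold (fun t r => r.set t (A.getD t [], (1:Int)))
    (List.replicate A.length (List.replicate A.length pvCell0)) A.length
  obtain ⟨h2len, h2cell⟩ := pvRowfold (fun t r => towerRow A t r)
    ((List.range A.length).foldl (fun F t => F.set t ((F.getD t []).set t (A.getD t [], (1:Int))))
      (List.replicate A.length (List.replicate A.length pvCell0))) A.length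
  rw [h2cell x (by rw [h1len, List.length_replicate]; exact hxn), if_pos hxn,
    h1cell x (by rw [List.length_replicate]; exact hxn), if_pos hxn,
    List.getD_replicate _ hxn]
  rw [towerRow]
  rw [(towerRow_inv A x hxn (A.length - (x+1)) le_rfl).2 y hxy.2,
    if_neg (by omega), if_pos (by omega)]
  rw [pvRowCell, pvV]
  split_ifs
  · rfl
  · rfl

-- ===== VERDICT (by name: the statement is the Claim_ definition above) =====
theorem tower_spec : Claim_equal_tower := by
  intro A _ _
  unfold Spec_tower
  rw [tower_eq, tower_alt_eq]
  apply le_antisymm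
  · refine pvNested_le _ _ _ _ (pvBest_nonneg A _) ?_
    intro b x hb
    rw [pvMaxfold_le_iff]
    refine ⟨hb, fun y hy => ?_⟩
    have hy' := List.mem_range'_1.mp hy
    have hxy : x < y ∧ y < A.length := by omega
    rw [pvV]
    split_ifs with hc
    · calc pvW A x y ≤ pvD A y := pvW_le_pvD A y x hxy.1 hc
        _ ≤ pvBest A A.length := pvBest_mem_le A hxy.2 (by
            have h1 := pvM_mem_le A hxy.1 hc
            have h2 := pvD_pos A x
            omega)
    · exact pvBest_nonneg A _
  · rw [pvBest_le_iff]
    constructor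
    · exact pvNested_init_le _ _ _ (fun b x => pvMaxfold_init_le _ _ _)
    · intro j hj hm
      have hpos : 0 < pvM A j := by have := pvM_nonneg A j; omega
      obtain ⟨i, hij, hc, hw⟩ := pvD_attained A j hpos
      refine pvNested_mem_le (x0 := i) _ _ _ _ (fun b x => pvMaxfold_init_le _ _ _)
        (List.mem_range.mpr (by omega)) (fun b => ?_)
      have hmem : j ∈ List.range' (i+1) (A.length - (i+1)) := by
        rw [List.mem_range'_1]; omega
      have hb := pvMaxfold_mem_le (pvV A i) _ b hmem
      rw [show pvV A i j = pvD A j by rw [pvV, if_pos hc, hw]] at hb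
      exact hb
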